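-- pv_equiv track=rewrite | github.com/Sion99/ProblemSolving | Programmers/Lv1_신고결과받기.py | solution
-- ===== SOURCE A (Python) =====
-- from collections import defaultdict
--
-- def solution(id_list, report, k):
--     answer = []
--
--     report = list(set(report))
--
--     user = defaultdict(set)
--     cnt = defaultdict(int)
--
--     for i in report:
--         case = i.split()
--         user[case[0]].add(case[1])
--         cnt[case[1]] += 1
--
--     for i in range(len(id_list)):
--         result = 0
--         for u in user[id_list[i]]:
--             if cnt[u] >= k:
--                 result += 1
--         answer.append(result)
--     return answer
-- ===== SOURCE B (Python) =====
-- from collections import Counter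
--
-- def solution(id_list, report, k):
--     # one pass over the deduplicated reports with a banned set, instead of
--     # A's nested per-id scan over each user's reported-set
--     pairs = [tuple(s.split()[:2]) for s in set(report)]
--     banned = {b for b, c in Counter(b for _, b in pairs).items() if c >= k}
--     score = Counter(a for a, b in set(pairs) if b in banned)
--     return [score[i] for i in id_list]
-- ===== Notes on version B (the rewrite author's own statement) =====
-- stated objective: alternative
-- what changed: Replaces A's per-id nested scan over each user's reported-set with a single pass over the deduplicated reports that increments a reporter->score Counter for pairs whose reported user is banned, then looks each id up.
import Mathlib
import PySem

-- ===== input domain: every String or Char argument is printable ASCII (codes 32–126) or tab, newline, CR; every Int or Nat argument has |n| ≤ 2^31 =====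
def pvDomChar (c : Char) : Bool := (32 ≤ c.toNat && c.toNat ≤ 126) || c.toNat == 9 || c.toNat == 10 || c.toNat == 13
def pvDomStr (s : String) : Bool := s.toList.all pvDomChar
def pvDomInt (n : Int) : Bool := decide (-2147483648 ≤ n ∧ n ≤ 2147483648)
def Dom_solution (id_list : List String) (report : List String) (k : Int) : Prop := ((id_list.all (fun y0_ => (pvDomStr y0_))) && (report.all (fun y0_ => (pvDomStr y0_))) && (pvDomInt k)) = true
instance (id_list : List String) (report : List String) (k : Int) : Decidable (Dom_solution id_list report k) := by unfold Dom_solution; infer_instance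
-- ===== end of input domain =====

-- B replaces A's nested per-id scan with one pass over the deduplicated reports
-- maintaining a reporter→score counter (objective: alternative decomposition).


-- ===== PORT A =====
-- `case[0]` / `case[1]` are read as `.getD _ ""`; inside Pre_solution every split
-- has length ≥ 2, so this equals Python's indexing exactly on the admitted inputs.
def solution (id_list : List String) (report : List String) (k : Int) : List Int :=
  let rep := PySem.Set.ofList report
  let st :=
    rep.foldl
      (fun (st : PySem.Dict String (PySem.Set String) × PySem.Dict String Int) i =>
        let case := PySem.Str.split₀ i
        (st.1.modify (case.getD 0 "") PySem.Set.empty (fun s => PySem.Set.add s (case.getD 1 "")),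
         st.2.modify (case.getD 1 "") 0 (· + 1)))
      (PySem.Dict.empty, PySem.Dict.empty)
  let user := st.1
  let cnt := st.2
  (List.range id_list.length).foldl
    (fun answer i =>
      answer ++
        [(user.getD (id_list.getD i "") PySem.Set.empty).foldl
            (fun result u => if cnt.getD u 0 ≥ k then result + 1 else result) 0])
    []

-- ===== PORT B =====
-- `s.split()[:2]` is read as the pair of `.getD 0 ""` / `.getD 1 ""`; exact inside Pre_solution.
def solution_alt (id_list : List String) (report : List String) (k : Int) : List Int :=
  let pairs : List (String × String) :=
    (PySem.Set.ofList report).map (fun s =>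
      let c := PySem.Str.split₀ s
      (c.getD 0 "", c.getD 1 ""))
  let cnt := PySem.Dict.counter (pairs.map (·.2))
  let banned : PySem.Set String :=
    PySem.Set.ofList ((cnt.items.filter (fun p => k ≤ p.2)).map (·.1))
  let score :=
    PySem.Dict.counter
      (((PySem.Set.ofList pairs).filter (fun p => PySem.Set.contains banned p.2)).map (·.1))
  id_list.map (fun i => score.getD i 0)

-- ===== PRECONDITION & SPEC =====
-- Pre_ excludes exactly the inputs where A raises IndexError: a report string
-- whose whitespace-split has fewer than two tokens (B raises ValueError there too).
def Pre_solution (id_list : List String) (report : List String) (k : Int) : Prop :=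
  ∀ s ∈ report, 2 ≤ (PySem.Str.split₀ s).length
instance (id_list : List String) (report : List String) (k : Int) : Decidable (Pre_solution id_list report k) := by unfold Pre_solution; infer_instance
def pvWitness_solution : List String × List String × Int :=
  (["muzi", "frodo", "apeach", "neo"],
   ["muzi frodo", "apeach frodo", "frodo neo", "muzi neo", "apeach muzi", "muzi frodo"], 2)
def Spec_solution (id_list : List String) (report : List String) (k : Int) (out : List Int) : Prop := out = solution_alt id_list report k
instance (id_list : List String) (report : List String) (k : Int) (out : List Int) : Decidable (Spec_solution id_list report k out) := by unfold Spec_solution; infer_instance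

-- ===== CLAIM (what is proved, stated in full; the proofs are below) =====
def Claim_equal_solution : Prop := ∀ (id_list : List String) (report : List String) (k : Int), Dom_solution id_list report k → Pre_solution id_list report k → Spec_solution id_list report k (solution id_list report k)

-- ===== LEMMAS AND PROOFS =====

-- A's user-dict loop: the per-key reported-set is the dedup of the seconds of the pairs with that first.
theorem getD_foldl_modify_setadd (l : List (String × String))
    (d : PySem.Dict String (PySem.Set String)) (c : String) :
    (l.foldl (fun d p => d.modify p.1 PySem.Set.empty (fun s => PySem.Set.add s p.2)) d).getD c PySem.Set.empty
      = PySem.Set.update (d.getD c PySem.Set.empty) ((l.filter (fun p => p.1 == c)).map (·.2)) := by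
  induction l generalizing d with
  | nil => simp [PySem.Set.update]
  | cons p t ih =>
    simp only [List.foldl_cons, ih, List.filter_cons]
    by_cases h : p.1 = c
    · simp [h, PySem.Dict.getD_modify_self, PySem.Set.update_cons]
    · have hb : (p.1 == c) = false := by simp [h]
      simp [hb, PySem.Dict.getD_modify, Ne.symm h]

-- counting distinct seconds among the pairs with first = x equals counting
-- distinct pairs with first = x (within one first, seconds determine the pair)
theorem countP_seconds_eq (pairs : List (String × String)) (x : String) (q : String → Bool) :
    (PySem.Set.ofList ((pairs.filter (fun p => p.1 == x)).map (·.2))).countP q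
      = (PySem.Set.ofList pairs).countP (fun p => p.1 == x && q p.2) := by
  classical
  have hLnd : ((PySem.Set.ofList ((pairs.filter (fun p => p.1 == x)).map (·.2))).filter q).Nodup :=
    (PySem.Set.nodup_ofList _).filter _
  have hRnd : ((PySem.Set.ofList pairs).filter (fun p => p.1 == x && q p.2)).Nodup :=
    (PySem.Set.nodup_ofList _).filter _
  have hRnd2 : (((PySem.Set.ofList pairs).filter (fun p => p.1 == x && q p.2)).map (·.2)).Nodup := by
    refine hRnd.map_on ?_
    intro a ha b hb hab
    have ha' := List.of_mem_filter ha
    have hb' := List.of_mem_filter hb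
    rw [Bool.and_eq_true] at ha' hb'
    have ha1 : a.1 = x := beq_iff_eq.mp ha'.1
    have hb1 : b.1 = x := beq_iff_eq.mp hb'.1
    exact Prod.ext (ha1.trans hb1.symm) hab
  have hmem : ∀ b, b ∈ (PySem.Set.ofList ((pairs.filter (fun p => p.1 == x)).map (·.2))).filter q ↔
      b ∈ ((PySem.Set.ofList pairs).filter (fun p => p.1 == x && q p.2)).map (·.2) := by
    intro b
    constructor
    · intro hbL
      obtain ⟨hbS, hq⟩ := List.mem_filter.mp hbL
      obtain ⟨p, hpfil, hp2⟩ := List.mem_map.mp ((PySem.Set.mem_ofList _ _).mp hbS)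
      obtain ⟨hp, hpx⟩ := List.mem_filter.mp hpfil
      refine List.mem_map.mpr ⟨p, List.mem_filter.mpr ⟨(PySem.Set.mem_ofList _ _).mpr hp, ?_⟩, hp2⟩
      rw [Bool.and_eq_true]
      exact ⟨hpx, by rw [hp2]; exact hq⟩
    · intro hbR
      obtain ⟨p, hpfil, hp2⟩ := List.mem_map.mp hbR
      obtain ⟨hpS, hpc⟩ := List.mem_filter.mp hpfil
      rw [Bool.and_eq_true] at hpc
      refine List.mem_filter.mpr ⟨(PySem.Set.mem_ofList _ _).mpr ?_, by rw [← hp2]; exact hpc.2⟩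
      exact List.mem_map.mpr ⟨p, List.mem_filter.mpr ⟨(PySem.Set.mem_ofList _ _).mp hpS, hpc.1⟩, hp2⟩
  have hperm := (List.perm_ext_iff_of_nodup hLnd hRnd2).mpr hmem
  rw [List.countP_eq_length_filter, List.countP_eq_length_filter, hperm.length_eq,
    List.length_map]

-- convert A's range-indexed map into a direct map over id_list
theorem map_range_getD {α β : Type} (l : List α) (d : α) (g : α → β) :
    (List.range l.length).map (fun i => g (l.getD i d)) = l.map g := by
  apply List.ext_getElem
  · simp
  · intro i h1 h2
    simp [List.getD_eq_getElem?_getD, List.getElem?_eq_getElem (by simpa using h1)]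

-- a reported user that occurs in the reports is banned iff its count reaches k
theorem contains_banned_iff (xs : List String) (k : Int) (u : String) (hu : u ∈ xs) :
    PySem.Set.contains
      (PySem.Set.ofList (((PySem.Dict.counter xs).items.filter (fun p => decide (k ≤ p.2))).map (·.1))) u
      = decide (k ≤ (PySem.Dict.counter xs).getD u 0) := by
  simp only [PySem.Dict.items_counter, PySem.Dict.getD_counter]
  by_cases h : k ≤ (xs.count u : Int)
  · simp only [h, decide_true]
    rw [PySem.Set.contains_iff]
    simp only [PySem.Set.mem_ofList, List.mem_map, List.mem_filter]
    exact ⟨(u, (xs.count u : Int)), ⟨⟨u, hu, rfl⟩, by simpa using h⟩, rfl⟩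
  · simp only [h, decide_false]
    rw [← Bool.not_eq_true, PySem.Set.contains_iff]
    simp only [PySem.Set.mem_ofList, List.mem_map, List.mem_filter]
    rintro ⟨⟨v, c⟩, ⟨⟨w, hw, hweq⟩, hc⟩, rfl⟩
    obtain ⟨h1, h2⟩ := Prod.mk.injEq .. ▸ hweq
    apply h
    have := of_decide_eq_true hc
    simp only [h1] at h2
    simpa [← h2] using this

-- the per-id count of banned reported users equals B's one-pass score for that id
theorem point_eq (pairs : List (String × String)) (k : Int) (x : String) :
    ((PySem.Set.ofList ((pairs.filter (fun p => p.1 == x)).map (·.2))).countP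
        (fun u => decide ((PySem.Dict.counter (pairs.map (·.2))).getD u 0 ≥ k)))
      = List.countP ((fun y => y == x) ∘ fun p => p.1)
          ((PySem.Set.ofList pairs).filter
            (fun p => PySem.Set.contains
              (PySem.Set.ofList (((PySem.Dict.counter (pairs.map (·.2))).items.filter
                (fun p => decide (k ≤ p.2))).map (·.1))) p.2)) := by
  rw [List.countP_filter]
  have h1 : ((PySem.Set.ofList ((pairs.filter (fun p => p.1 == x)).map (·.2))).countP
        (fun u => decide ((PySem.Dict.counter (pairs.map (·.2))).getD u 0 ≥ k)))
      = ((PySem.Set.ofList ((pairs.filter (fun p => p.1 == x)).map (·.2))).countP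
        (fun u => PySem.Set.contains
          (PySem.Set.ofList (((PySem.Dict.counter (pairs.map (·.2))).items.filter
            (fun p => decide (k ≤ p.2))).map (·.1))) u)) := by
    apply List.countP_congr
    intro u hu
    have humem : u ∈ pairs.map (·.2) := by
      obtain ⟨p, hp, hp2⟩ := List.mem_map.mp ((PySem.Set.mem_ofList _ _).mp hu)
      exact List.mem_map.mpr ⟨p, (List.mem_filter.mp hp).1, hp2⟩
    rw [contains_banned_iff _ k u humem]
  rw [h1, countP_seconds_eq pairs x]
  apply List.countP_congr
  intro p _
  simp [Function.comp]

-- ===== VERDICT (by name: the statement is the Claim_ definition above) =====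
theorem solution_spec : Claim_equal_solution := by
  intro id_list report k _ hpre
  unfold Spec_solution solution solution_alt
  simp only []
  rw [PySem.List.foldl_prod_mk
      (f := fun (d : PySem.Dict String (PySem.Set String)) i =>
        d.modify ((PySem.Str.split₀ i).getD 0 "") PySem.Set.empty
          (fun s => PySem.Set.add s ((PySem.Str.split₀ i).getD 1 "")))
      (g := fun (d : PySem.Dict String Int) i =>
        d.modify ((PySem.Str.split₀ i).getD 1 "") 0 (· + 1))]
  rw [PySem.List.foldl_append_singleton_eq_map]
  dsimp only
  simp only [List.nil_append]
  rw [map_range_getD id_list "" (fun x =>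
    ((List.foldl (fun d i =>
        PySem.Dict.modify d ((PySem.Str.split₀ i).getD 0 "") PySem.Set.empty fun s =>
          PySem.Set.add s ((PySem.Str.split₀ i).getD 1 "")) PySem.Dict.empty
        (PySem.Set.ofList report)).getD x PySem.Set.empty).foldl
      (fun result u =>
        if (List.foldl (fun d i =>
              PySem.Dict.modify d ((PySem.Str.split₀ i).getD 1 "") 0 fun x => x + 1)
              PySem.Dict.empty (PySem.Set.ofList report)).getD u 0 ≥ k
        then result + 1 else result) 0)]
  apply List.map_congr_left
  intro x _
  -- turn A's two folds over report-strings into folds over the token pairs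
  rw [show (List.foldl (fun d i =>
        PySem.Dict.modify d ((PySem.Str.split₀ i).getD 0 "") PySem.Set.empty fun s =>
          PySem.Set.add s ((PySem.Str.split₀ i).getD 1 "")) PySem.Dict.empty
        (PySem.Set.ofList report))
      = (List.foldl (fun d (p : String × String) =>
          PySem.Dict.modify d p.1 PySem.Set.empty fun s => PySem.Set.add s p.2) PySem.Dict.empty
          ((PySem.Set.ofList report).map (fun s =>
            ((PySem.Str.split₀ s).getD 0 "", (PySem.Str.split₀ s).getD 1 "")))) from
    (List.foldl_map
      (f := fun s => ((PySem.Str.split₀ s).getD 0 "", (PySem.Str.split₀ s).getD 1 ""))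
      (g := fun d (p : String × String) =>
        PySem.Dict.modify d p.1 PySem.Set.empty fun s => PySem.Set.add s p.2)).symm]
  rw [show (List.foldl (fun d i =>
        PySem.Dict.modify d ((PySem.Str.split₀ i).getD 1 "") 0 fun x => x + 1)
        PySem.Dict.empty (PySem.Set.ofList report))
      = PySem.Dict.counter
          (((PySem.Set.ofList report).map (fun s =>
            ((PySem.Str.split₀ s).getD 0 "", (PySem.Str.split₀ s).getD 1 ""))).map (·.2)) from by
    rw [PySem.Dict.counter_eq_foldl, List.foldl_map, List.foldl_map]]
  rw [getD_foldl_modify_setadd, PySem.Dict.getD_empty, PySem.Set.update_empty]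
  rw [PySem.List.foldl_ite_add_one
    (p := fun u => (PySem.Dict.counter
      (((PySem.Set.ofList report).map (fun s =>
        ((PySem.Str.split₀ s).getD 0 "", (PySem.Str.split₀ s).getD 1 ""))).map (·.2))).getD u 0 ≥ k)]
  rw [PySem.Dict.getD_counter, List.count_eq_countP, List.countP_map, Int.zero_add]
  congr 1
  exact point_eq _ k x
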